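-- pv_equiv track=rewrite | github.com/morgoth1145/advent-of-code | 2021/21/solution.py | compute_winning_universe_counts
-- ===== SOURCE A (Python) =====
-- def compute_winning_universe_counts(positions, position_to_moves, die):
--     player_moves = [sorted(position_to_moves[p-1].items(), reverse=True)
--                     for p in positions]
--
--     wins = [0] * len(positions)
--     player_universes = [1] * len(positions)
--     remaining_players = len(positions)
--
--     turn = 0
--     while remaining_players:
--         for idx, moves in enumerate(player_moves):
--             if 0 == len(moves):
--                 # This player was eliminated already!
--                 continue
--             player_universes[idx] *= die ** 3
--             if moves[-1][0] == turn+1: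
--                 _, winning_universes = moves.pop(-1)
--                 player_universes[idx] -= winning_universes
--                 for j, ou in enumerate(player_universes):
--                     if idx != j:
--                         winning_universes *= ou
--                 wins[idx] += winning_universes
--                 if 0 == len(moves):
--                     remaining_players -= 1
--         turn += 1
--
--     return wins
-- ===== SOURCE B (Python) =====
-- def compute_winning_universe_counts(positions, position_to_moves, die):
--     n = len(positions)
--     movedicts = [position_to_moves[p - 1] for p in positions]
--     maxturns = [max(d) for d in movedicts]
--     total_turns = max(maxturns, default=0)
--     roll = die ** 3
--     # Per-player alive-universe trajectory: alive[i][t] = universes in which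
--     # player i is still playing after turn t (frozen once t > maxturns[i]).
--     alive = []
--     for d, last in zip(movedicts, maxturns):
--         traj = [1]
--         for t in range(1, last + 1):
--             traj.append(traj[-1] * roll - d.get(t, 0))
--         alive.append(traj)
--
--     def universes(j, t):
--         return alive[j][min(t, maxturns[j])]
--
--     wins = [0] * n
--     for t in range(1, total_turns + 1):
--         for i in range(n):
--             w = movedicts[i].get(t, 0)
--             if w == 0:
--                 continue
--             for j in range(n):
--                 if j < i:
--                     w *= universes(j, t)
--                 elif j > i:
--                     w *= universes(j, t - 1)
--             wins[i] += w
--     return wins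
-- ===== Notes on version B (the rewrite author's own statement) =====
-- stated objective: alternative
-- what changed: A simulates the game turn by turn, popping per-player descending-sorted move stacks while mutating all players' live-universe counters and a remaining-player count in lockstep; B instead first computes each player's alive-universe trajectory independently from a per-player recurrence (frozen after that player's last winning turn) and then, in a separate pass over turns, credits each winning turn with winners times the product of the other players' alive counts (post-turn value for smaller indices, pre-turn value for larger ones).
import Mathlib
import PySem

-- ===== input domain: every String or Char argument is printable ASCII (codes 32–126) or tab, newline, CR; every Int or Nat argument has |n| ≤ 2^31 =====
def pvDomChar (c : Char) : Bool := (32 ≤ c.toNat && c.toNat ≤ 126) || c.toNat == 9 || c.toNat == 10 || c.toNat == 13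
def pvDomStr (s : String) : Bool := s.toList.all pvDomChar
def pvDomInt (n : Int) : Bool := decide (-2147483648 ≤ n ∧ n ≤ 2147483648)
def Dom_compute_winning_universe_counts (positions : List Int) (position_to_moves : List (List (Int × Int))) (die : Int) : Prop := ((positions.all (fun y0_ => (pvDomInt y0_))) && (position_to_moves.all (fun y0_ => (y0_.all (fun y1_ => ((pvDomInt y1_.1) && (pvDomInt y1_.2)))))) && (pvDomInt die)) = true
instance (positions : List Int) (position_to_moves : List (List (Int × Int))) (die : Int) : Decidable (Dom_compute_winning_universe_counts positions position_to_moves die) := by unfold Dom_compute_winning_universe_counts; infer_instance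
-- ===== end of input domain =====

-- B replaces A's turn-by-turn simulation (popping sorted move stacks while updating all
-- players' live-universe counters in lockstep) by a two-phase computation: first each
-- player's alive-universe trajectory from a per-player recurrence, then a direct
-- product-formula pass crediting each winning turn.  Objective: alternative decomposition.

-- ===== PORT A =====
-- one body of A's inner `for idx, moves in enumerate(player_moves)` loop
def pvA_innerLoop (die turn : Int) (st : List (List (Int × Int)) × List Int × List Int × Int)
    (idx : Nat) : List (List (Int × Int)) × List Int × List Int × Int :=
  match st with
  | (pm, pu, wins, rem) =>
    let moves := pm.getD idx []
    if moves.length = 0 then (pm, pu, wins, rem)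
    else
      let pu1 := pu.set idx (pu.getD idx 0 * die ^ 3)
      match moves.getLast? with          -- moves[-1] (list is nonempty here)
      | some kv =>
        if kv.1 = turn + 1 then
          let moves' := moves.dropLast   -- moves.pop(-1)
          let pm1 := pm.set idx moves'
          let pu2 := pu1.set idx (pu1.getD idx 0 - kv.2)
          -- for j, ou in enumerate(player_universes): if idx != j: winning_universes *= ou
          let wu2 := pu2.zipIdx.foldl (fun w p => if idx ≠ p.2 then w * p.1 else w) kv.2
          let wins1 := wins.set idx (wins.getD idx 0 + wu2)
          let rem1 := if moves'.length = 0 then rem - 1 else rem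
          (pm1, pu2, wins1, rem1)
        else (pm, pu1, wins, rem)
      | none => (pm, pu1, wins, rem)     -- unreachable: moves is nonempty

-- A's `while remaining_players:` loop; the Nat argument is a fuel bound making the
-- recursion total (on inputs satisfying Pre_ it is large enough and never bites)
def pvA_while (die : Int) : Nat → Int → (List (List (Int × Int)) × List Int × List Int × Int) → List Int
  | 0, _, st => st.2.2.1
  | fuel + 1, turn, st =>
      if st.2.2.2 ≠ 0 then
        pvA_while die fuel (turn + 1) ((List.range st.1.length).foldl (pvA_innerLoop die turn) st)
      else st.2.2.1

def compute_winning_universe_counts (positions : List Int) (position_to_moves : List (List (Int × Int))) (die : Int) : List Int :=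
  -- player_moves = [sorted(position_to_moves[p-1].items(), reverse=True) for p in positions]
  let player_moves := positions.map (fun p =>
    PySem.List.sorted2 ((PySem.List.pyGet? position_to_moves (p - 1)).getD []) Prod.fst Prod.snd true)
  -- fuel for the while loop: max move key over all players (enough turns under Pre_)
  let fuel := player_moves.foldl (fun a m => m.foldl (fun a kv => max a kv.1.toNat) a) 0
  pvA_while die fuel 0
    (player_moves, List.replicate positions.length (1 : Int),
     List.replicate positions.length (0 : Int), (positions.length : Int))

-- ===== PORT B =====
-- d.get(t, 0): first-match lookup (a Python dict has unique keys)
def pvB_get (d : List (Int × Int)) (t : Int) : Int :=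
  ((d.find? (fun kv => kv.1 == t)).map Prod.snd).getD 0

-- max(d): maximum key; on an empty dict Python raises ValueError (excluded by Pre_)
def pvB_maxKey (d : List (Int × Int)) : Int :=
  match d.map Prod.fst with
  | [] => 0
  | k :: ks => ks.foldl max k

-- the trajectory loop: traj = [1]; for t in range(1, last+1): traj.append(traj[-1]*roll - d.get(t,0))
def pvB_traj (roll : Int) (d : List (Int × Int)) (last : Int) : List Int :=
  (PySem.List.pyRange 1 (last + 1)).foldl
    (fun traj t => traj ++ [(traj.getLast?.getD 0) * roll - pvB_get d t]) [1]

-- universes(j, t) = alive[j][min(t, maxturns[j])]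
def pvB_univ (alive : List (List Int)) (maxturns : List Int) (j : Nat) (t : Int) : Int :=
  (alive.getD j []).getD (min t (maxturns.getD j 0)).toNat 0

def compute_winning_universe_counts_alt (positions : List Int) (position_to_moves : List (List (Int × Int))) (die : Int) : List Int :=
  let n := positions.length
  let movedicts := positions.map (fun p => (PySem.List.pyGet? position_to_moves (p - 1)).getD [])
  let maxturns := movedicts.map pvB_maxKey
  let total := match maxturns with | [] => (0 : Int) | k :: ks => ks.foldl max k  -- max(maxturns, default=0)
  let roll := die ^ 3
  let alive := (movedicts.zip maxturns).map (fun dl => pvB_traj roll dl.1 dl.2)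
  (PySem.List.pyRange 1 (total + 1)).foldl (fun wins t =>
      (List.range n).foldl (fun wins i =>
          let w := pvB_get (movedicts.getD i []) t
          if w = 0 then wins
          else
            wins.set i (wins.getD i 0 +
              (List.range n).foldl (fun w j =>
                  if j < i then w * pvB_univ alive maxturns j t
                  else if i < j then w * pvB_univ alive maxturns j (t - 1)
                  else w) w))
        wins)
    (List.replicate n (0 : Int))

-- ===== PRECONDITION & SPEC =====
-- Pre_ admits the inputs on which the Python A returns: every position must resolve to a
-- dict (index in range, else IndexError), each of these dicts must be nonempty with all
-- keys ≥ 1 (otherwise A's while loop never eliminates that player and A diverges), and —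
-- as inner lists here stand for Python dicts — must have pairwise-distinct keys.
def Pre_compute_winning_universe_counts (positions : List Int) (position_to_moves : List (List (Int × Int))) (die : Int) : Prop :=
  ∀ p ∈ positions,
    (-(position_to_moves.length : Int) ≤ p - 1 ∧ p - 1 < (position_to_moves.length : Int)) ∧
    ((PySem.List.pyGet? position_to_moves (p - 1)).getD []) ≠ [] ∧
    (∀ kv ∈ (PySem.List.pyGet? position_to_moves (p - 1)).getD [], 1 ≤ kv.1) ∧
    (((PySem.List.pyGet? position_to_moves (p - 1)).getD []).map Prod.fst).Nodup

instance (positions : List Int) (position_to_moves : List (List (Int × Int))) (die : Int) : Decidable (Pre_compute_winning_universe_counts positions position_to_moves die) := by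
  unfold Pre_compute_winning_universe_counts; infer_instance

def pvWitness_compute_winning_universe_counts : List Int × (List (List (Int × Int))) × Int :=
  ([1, 2], [[(1, 3), (2, 4)], [(2, 5)]], 3)

def Spec_compute_winning_universe_counts (positions : List Int) (position_to_moves : List (List (Int × Int))) (die : Int) (out : List Int) : Prop := out = compute_winning_universe_counts_alt positions position_to_moves die
instance (positions : List Int) (position_to_moves : List (List (Int × Int))) (die : Int) (out : List Int) : Decidable (Spec_compute_winning_universe_counts positions position_to_moves die out) := by unfold Spec_compute_winning_universe_counts; infer_instance

-- ===== CLAIM (what is proved, stated in full; the proofs are below) =====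
def Claim_equal_compute_winning_universe_counts : Prop := ∀ (positions : List Int) (position_to_moves : List (List (Int × Int))) (die : Int), Dom_compute_winning_universe_counts positions position_to_moves die → Pre_compute_winning_universe_counts positions position_to_moves die → Spec_compute_winning_universe_counts positions position_to_moves die (compute_winning_universe_counts positions position_to_moves die)

-- ===== LEMMAS AND PROOFS =====

-- Good dicts / sortedness ---------------------------------------------------
def pvGood (s : List (Int × Int)) : Prop :=
  s ≠ [] ∧ (∀ kv ∈ s, 1 ≤ kv.1) ∧ (s.map Prod.fst).Nodup

def pvDesc (s : List (Int × Int)) : Prop := s.Pairwise (fun a b => b.1 < a.1)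

-- mathematical description of the loop state --------------------------------
def pvAlive (die : Int) (s : List (Int × Int)) : Nat → Int
  | 0 => 1
  | t + 1 => pvAlive die s t * die ^ 3 - pvB_get s ((t : Int) + 1)

def pvAliveAt (die : Int) (s : List (Int × Int)) (t : Nat) : Int :=
  pvAlive die s (min t (pvB_maxKey s).toNat)

def pvContrib (die : Int) (ss : List (List (Int × Int))) (u : Nat) (i : Nat) : Int :=
  (List.range ss.length).foldl
    (fun w j => if i ≠ j then w * pvAliveAt die (ss.getD j []) (if j < i then u else u - 1) else w)
    (pvB_get (ss.getD i []) (u : Int))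

def pvWinsum (die : Int) (ss : List (List (Int × Int))) (τ : Nat) (i : Nat) : Int :=
  ((List.range τ).map (fun u => pvContrib die ss (u + 1) i)).sum

def pvState (die : Int) (ss : List (List (Int × Int))) (t : Nat) (i : Nat) :
    List (List (Int × Int)) × List Int × List Int × Int :=
  ((List.range ss.length).map (fun j =>
      (ss.getD j []).filter (fun kv => decide ((if j < i then (t : Int) + 1 else (t : Int)) < kv.1))),
   (List.range ss.length).map (fun j => pvAliveAt die (ss.getD j []) (if j < i then t + 1 else t)),
   (List.range ss.length).map (fun j => pvWinsum die ss (if j < i then t + 1 else t) j),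
   (((List.range ss.length).filter (fun j =>
      decide ((if j < i then (t : Int) + 1 else (t : Int)) < pvB_maxKey (ss.getD j [])))).length : Int))

-- generic helpers -----------------------------------------------------------
theorem pv_mapRange_getD {α : Type} (n : Nat) (f : Nat → α) (d : α) (i : Nat) (hi : i < n) :
    ((List.range n).map f).getD i d = f i := by
  simp [List.getD, List.getElem?_map, List.getElem?_range, hi]

theorem pv_mapRange_set {α : Type} (n : Nat) (f : Nat → α) (i : Nat) (hi : i < n) (v : α) :
    ((List.range n).map f).set i v = (List.range n).map (fun j => if j = i then v else f j) := by
  apply List.ext_getElem?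
  intro j
  by_cases hj : j < n
  · by_cases hji : j = i
    · subst hji; simp [List.getElem?_set, List.getElem?_map, List.getElem?_range, hj]
    · rw [List.getElem?_set_ne (by omega)]
      simp [hj, hji]
  · have h1 : ¬ j < (((List.range n).map f).set i v).length := by simpa using hj
    rw [List.getElem?_eq_none (by simpa using hj), List.getElem?_eq_none (by simpa using hj)]

theorem pv_foldl_range_step {σ : Type} (n : Nat) (g : σ → Nat → σ) (Φ : Nat → σ)
    (h : ∀ i < n, g (Φ i) i = Φ (i + 1)) :
    (List.range n).foldl g (Φ 0) = Φ n := by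
  induction n with
  | zero => rfl
  | succ n ih =>
    rw [List.range_succ, List.foldl_append]
    rw [ih (fun i hi => h i (Nat.lt_succ_of_lt hi))]
    simpa using h n (Nat.lt_succ_self n)

theorem pv_zipIdx_foldl_aux {α β : Type} (l : List α) (d : α) (h : β → α → Nat → β) :
    ∀ (k : Nat) (a : β), (l.zipIdx k).foldl (fun w p => h w p.1 p.2) a
      = (List.range l.length).foldl (fun w j => h w (l.getD j d) (j + k)) a := by
  induction l with
  | nil => intro k a; rfl
  | cons x l ih =>
    intro k a
    rw [List.zipIdx_cons, List.foldl_cons]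
    rw [ih (k + 1) (h a x k)]
    rw [List.length_cons, List.range_succ_eq_map, List.foldl_cons, List.foldl_map]
    simp only [List.getD_cons_zero, List.getD_cons_succ, Nat.zero_add]
    congr 1
    funext w j
    congr 1
    omega

theorem pv_zipIdx_foldl {α β : Type} (l : List α) (d : α) (h : β → α → Nat → β) (a : β) :
    l.zipIdx.foldl (fun w p => h w p.1 p.2) a
      = (List.range l.length).foldl (fun w j => h w (l.getD j d) j) a := by
  simpa using pv_zipIdx_foldl_aux l d h 0 a

theorem pv_foldl_mul_zero {α : Type} (l : List α) (p : α → Prop) [DecidablePred p] (f : α → Int) :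
    l.foldl (fun w j => if p j then w * f j else w) 0 = 0 := by
  induction l with
  | nil => rfl
  | cons x l ih => by_cases h : p x <;> simp [h, ih]
theorem pv_insertBy_perm {α : Type} (bef : α → α → Bool) (x : α) (ys : List α) :
    (PySem.List.insertBy bef x ys).Perm (x :: ys) := by
  induction ys with
  | nil => simp [PySem.List.insertBy]
  | cons y ys ih =>
    rw [PySem.List.insertBy]
    by_cases h : bef x y = true
    · simp [h]
    · simp only [h, if_false]
      exact (ih.cons y).trans (List.Perm.swap x y ys)

theorem pv_insertBy_pairwise {α : Type} (P : α → α → Prop) (htrans : ∀ {a b c}, P a b → P b c → P a c)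
    (bef : α → α → Bool) (x : α) (ys : List α) (hys : ys.Pairwise P)
    (h1 : ∀ y ∈ ys, bef x y = true → P x y) (h2 : ∀ y ∈ ys, bef x y = false → P y x) :
    (PySem.List.insertBy bef x ys).Pairwise P := by
  induction ys with
  | nil => simp [PySem.List.insertBy]
  | cons y ys ih =>
    rw [PySem.List.insertBy]
    rcases List.pairwise_cons.mp hys with ⟨hy, hys'⟩
    by_cases h : bef x y = true
    · simp only [h, if_true]
      refine List.pairwise_cons.mpr ⟨?_, hys⟩
      intro z hz
      rcases List.mem_cons.mp hz with rfl | hz'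
      · exact h1 z (by simp) h
      · exact htrans (h1 y (by simp) h) (hy z hz')
    · simp only [h, if_false]
      refine List.pairwise_cons.mpr ⟨?_, ih hys' (fun z hz hb => h1 z (by simp [hz]) hb)
        (fun z hz hb => h2 z (by simp [hz]) hb)⟩
      intro z hz
      rcases (PySem.List.mem_insertBy bef x z ys).mp hz with hzx | hz'
      · subst hzx; exact h2 y (by simp) (by simpa using h)
      · exact hy z hz'

theorem pv_sorted2_desc (m : List (Int × Int)) (hnd : (m.map Prod.fst).Nodup) :
    pvDesc (PySem.List.sorted2 m Prod.fst Prod.snd true) := by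
  rw [PySem.List.sorted2]
  simp only
  -- fold invariant: acc pairwise, (acc ++ rest) has nodup keys
  suffices H : ∀ (xs acc : List (Int × Int)), acc.Pairwise (fun a b => b.1 < a.1) →
      ((acc ++ xs).map Prod.fst).Nodup →
      (xs.foldl (fun acc x => PySem.List.insertBy
        (fun a b => decide (b.1 < a.1) || !decide (a.1 < b.1) && decide (b.2 < a.2)) x acc) acc).Pairwise
        (fun a b => b.1 < a.1) by
    exact H m [] (by simp) (by simpa using hnd)
  intro xs
  induction xs with
  | nil => intro acc h _; exact h
  | cons x xs ih =>
    intro acc hacc hnd'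
    rw [List.foldl_cons]
    have hxkey : ∀ y ∈ acc, y.1 ≠ x.1 := by
      intro y hy
      have := hnd'
      simp only [List.map_append, List.nodup_append] at this
      intro he
      exact this.2.2 y.1 (List.mem_map_of_mem (f := Prod.fst) hy) x.1 (by simp) he
    apply ih
    · refine pv_insertBy_pairwise (P := fun a b => b.1 < a.1)
        (fun {a b c} hab hbc => lt_trans hbc hab) _ x acc hacc ?_ ?_
      · intro y hy hb
        simp only [Bool.or_eq_true, decide_eq_true_eq, Bool.and_eq_true, Bool.not_eq_true',
          decide_eq_false_iff_not] at hb
        rcases hb with h | ⟨h, _⟩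
        · exact h
        · rcases lt_trichotomy x.1 y.1 with h' | h' | h'
          · exact absurd h' h
          · exact absurd h'.symm (hxkey y hy)
          · exact h'
      · intro y hy hb
        simp only [Bool.or_eq_false_iff, decide_eq_false_iff_not] at hb
        rcases lt_trichotomy x.1 y.1 with h' | h' | h'
        · exact h'
        · exact absurd h'.symm (hxkey y hy)
        · exact absurd h' hb.1
    · have hperm : ((PySem.List.insertBy
          (fun a b => decide (b.1 < a.1) || !decide (a.1 < b.1) && decide (b.2 < a.2)) x acc)
          ++ xs).Perm ((x :: acc) ++ xs) :=
        (pv_insertBy_perm _ x acc).append_right xs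
      have := (hperm.map Prod.fst).nodup_iff.mpr ?_
      · exact this
      · have : ((x :: acc) ++ xs).Perm (acc ++ x :: xs) := by
          simpa using (List.perm_middle (a := x) (l₁ := acc) (l₂ := xs)).symm
        exact ((this.map Prod.fst).nodup_iff).mpr hnd'
theorem pv_maxKey_mem (d : List (Int × Int)) (hne : d ≠ []) :
    pvB_maxKey d ∈ d.map Prod.fst := by
  cases d with
  | nil => exact absurd rfl hne
  | cons kv rest =>
    show (List.map Prod.fst rest).foldl max kv.1 ∈ _
    rcases PySem.List.foldl_max_mem (rest.map Prod.fst) kv.1 with h | h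
    · rw [h]; simp
    · simp [h]

theorem pv_maxKey_le (d : List (Int × Int)) : ∀ k ∈ d.map Prod.fst, k ≤ pvB_maxKey d := by
  cases d with
  | nil => simp
  | cons kv rest =>
    intro k hk
    show k ≤ (List.map Prod.fst rest).foldl max kv.1
    rcases List.mem_map.mp hk with ⟨x, hx, rfl⟩
    rcases List.mem_cons.mp hx with rfl | h
    · exact (PySem.List.le_foldl_max _ _).1
    · exact (PySem.List.le_foldl_max _ _).2 x.1 (List.mem_map_of_mem h)

theorem pv_maxKey_perm (s m : List (Int × Int)) (hp : s.Perm m) (hne : m ≠ []) :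
    pvB_maxKey s = pvB_maxKey m := by
  have hsne : s ≠ [] := by
    intro h; subst h; exact hne hp.symm.eq_nil
  apply le_antisymm
  · exact pv_maxKey_le m _ ((hp.map Prod.fst).mem_iff.mp (pv_maxKey_mem s hsne))
  · exact pv_maxKey_le s _ ((hp.map Prod.fst).mem_iff.mpr (pv_maxKey_mem m hne))

theorem pv_get_eq_zero (d : List (Int × Int)) (t : Int) (h : ∀ kv ∈ d, kv.1 ≠ t) :
    pvB_get d t = 0 := by
  have : d.find? (fun kv => kv.1 == t) = none := by
    rw [List.find?_eq_none]
    intro kv hkv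
    simpa using h kv hkv
  simp [pvB_get, this]

theorem pv_get_perm (s m : List (Int × Int)) (hp : s.Perm m) (hnd : (m.map Prod.fst).Nodup)
    (t : Int) : pvB_get s t = pvB_get m t := by
  cases hm : m.find? (fun kv => kv.1 == t) with
  | none =>
    have hs : s.find? (fun kv => kv.1 == t) = none := by
      rw [List.find?_eq_none] at hm ⊢
      intro kv hkv; exact hm kv (hp.mem_iff.mp hkv)
    simp [pvB_get, hs, hm]
  | some kv =>
    have hkvm : kv ∈ m := List.mem_of_find?_eq_some hm
    have hkvt : kv.1 = t := by simpa using List.find?_some hm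
    have hkvs : kv ∈ s := hp.mem_iff.mpr hkvm
    cases hs : s.find? (fun kv => kv.1 == t) with
    | none =>
      rw [List.find?_eq_none] at hs
      exact absurd (by simpa using hkvt) (hs kv hkvs)
    | some kv' =>
      have hkv'm : kv' ∈ m := hp.mem_iff.mp (List.mem_of_find?_eq_some hs)
      have hkv't : kv'.1 = t := by simpa using List.find?_some hs
      have : kv' = kv :=
        List.inj_on_of_nodup_map hnd hkv'm hkvm (by rw [hkv't, hkvt])
      simp [pvB_get, hs, hm, this]
theorem pv_filter_decomp (s : List (Int × Int)) (t : Int)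
    (kv : Int × Int) (h : (s.filter (fun kv => decide (t < kv.1))).getLast? = some kv) :
    s.filter (fun kv => decide (t < kv.1))
      = (s.filter (fun kv => decide (t < kv.1))).dropLast ++ [kv] := by
  have hne : s.filter (fun kv => decide (t < kv.1)) ≠ [] := by
    intro h'; rw [h'] at h; simp at h
  conv_lhs => rw [← List.dropLast_append_getLast hne]
  rw [List.getLast?_eq_some_getLast hne] at h
  simp only [Option.some.injEq] at h
  rw [h]

theorem pv_filter_getLast (s : List (Int × Int)) (hd : pvDesc s) (t : Int)
    (kv : Int × Int) (h : (s.filter (fun kv => decide (t < kv.1))).getLast? = some kv) :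
    kv ∈ s ∧ t < kv.1 ∧ ∀ kv' ∈ s, t < kv'.1 → kv.1 ≤ kv'.1 := by
  have hdec := pv_filter_decomp s t kv h
  have hkvf : kv ∈ s.filter (fun kv => decide (t < kv.1)) := by rw [hdec]; simp
  have hmem := List.mem_filter.mp hkvf
  refine ⟨hmem.1, by simpa using hmem.2, ?_⟩
  intro kv' hkv' ht'
  have hkv'f : kv' ∈ s.filter (fun kv => decide (t < kv.1)) := List.mem_filter.mpr ⟨hkv', by simpa using ht'⟩
  rw [hdec] at hkv'f
  rcases List.mem_append.mp hkv'f with hdl | hl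
  · have hpw : (((s.filter (fun kv => decide (t < kv.1))).dropLast) ++ [kv]).Pairwise
        (fun a b => b.1 < a.1) := by
      rw [← hdec]; exact hd.filter _
    have h3 : kv.1 < kv'.1 := (List.pairwise_append.mp hpw).2.2 kv' hdl kv (by simp)
    omega
  · simp at hl; simp [hl]

theorem pv_filter_dropLast (s : List (Int × Int)) (hd : pvDesc s) (t : Int)
    (kv : Int × Int) (h : (s.filter (fun kv => decide (t < kv.1))).getLast? = some kv)
    (hk : kv.1 = t + 1) :
    (s.filter (fun kv => decide (t < kv.1))).dropLast
      = s.filter (fun kv => decide (t + 1 < kv.1)) := by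
  have hdec := pv_filter_decomp s t kv h
  have hpw : (((s.filter (fun kv => decide (t < kv.1))).dropLast) ++ [kv]).Pairwise
      (fun a b => b.1 < a.1) := by rw [← hdec]; exact hd.filter _
  have hgt : ∀ x ∈ (s.filter (fun kv => decide (t < kv.1))).dropLast, t + 1 < x.1 := by
    intro x hx
    have h3 : kv.1 < x.1 := (List.pairwise_append.mp hpw).2.2 x hx kv (by simp)
    omega
  have h1 : s.filter (fun kv => decide (t + 1 < kv.1))
      = (s.filter (fun kv => decide (t < kv.1))).filter (fun kv => decide (t + 1 < kv.1)) := by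
    rw [List.filter_filter]
    apply List.filter_congr
    intro x hx
    by_cases h' : t + 1 < x.1
    · simp [h', show t < x.1 by omega]
    · simp [h']
  have h2 : List.filter (fun kv => decide (t + 1 < kv.1)) [kv] = [] := by
    simp [List.filter_cons, hk]
  symm
  rw [h1]
  conv_lhs => rw [hdec]
  rw [List.filter_append, h2, List.append_nil]
  exact List.filter_eq_self.mpr (fun x hx => by simpa using hgt x hx)
theorem pv_get_of_mem (m : List (Int × Int)) (hnd : (m.map Prod.fst).Nodup)
    (kv : Int × Int) (h : kv ∈ m) : pvB_get m kv.1 = kv.2 := by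
  cases hf : m.find? (fun kv' => kv'.1 == kv.1) with
  | none =>
    rw [List.find?_eq_none] at hf
    exact absurd (by simp) (hf kv h)
  | some kv' =>
    have h1 : kv' ∈ m := List.mem_of_find?_eq_some hf
    have h2 : kv'.1 = kv.1 := by simpa using List.find?_some hf
    have : kv' = kv := List.inj_on_of_nodup_map hnd h1 h h2
    simp [pvB_get, hf, this]

theorem pv_filter_nil_iff (s : List (Int × Int)) (hne : s ≠ []) (τ : Int) :
    s.filter (fun kv => decide (τ < kv.1)) = [] ↔ pvB_maxKey s ≤ τ := by
  rw [List.filter_eq_nil_iff]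
  constructor
  · intro h
    rcases List.mem_map.mp (pv_maxKey_mem s hne) with ⟨kv, hkv, hk⟩
    have := h kv hkv
    simp at this
    omega
  · intro h kv hkv
    have := pv_maxKey_le s kv.1 (List.mem_map_of_mem hkv)
    simp
    omega

theorem pv_alive_congr (die : Int) (s m : List (Int × Int))
    (hg : ∀ t, pvB_get s t = pvB_get m t) : ∀ t, pvAlive die s t = pvAlive die m t := by
  intro t
  induction t with
  | zero => rfl
  | succ t ih => simp [pvAlive, ih, hg]

theorem pv_winsum_succ (die : Int) (ss : List (List (Int × Int))) (τ i : Nat) :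
    pvWinsum die ss (τ + 1) i = pvWinsum die ss τ i + pvContrib die ss (τ + 1) i := by
  simp [pvWinsum, List.range_succ]

theorem pv_count_update (n i : Nat) (p q : Nat → Bool) (hpq : ∀ j, j ≠ i → p j = q j)
    (hi : i < n) :
    (((List.range n).filter q).length : Int)
      = ((List.range n).filter p).length + (if q i then 1 else 0) - (if p i then 1 else 0) := by
  induction n with
  | zero => omega
  | succ n ih =>
    rw [List.range_succ, List.filter_append, List.filter_append]
    by_cases hin : i < n
    · have ih' := ih hin
      have : List.filter q [n] = List.filter p [n] := by
        simp only [List.filter_cons, List.filter_nil]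
        rw [hpq n (by omega)]
      rw [this]
      simp only [List.length_append]
      push_cast
      omega
    · have hieq : i = n := by omega
      subst hieq
      have : List.filter q (List.range i) = List.filter p (List.range i) := by
        apply List.filter_congr
        intro j hj
        exact (hpq j (by simp at hj; omega)).symm
      rw [this]
      simp only [List.length_append, List.filter_cons, List.filter_nil]
      by_cases hq : q i <;> by_cases hp : p i <;> simp [hq, hp] <;> push_cast <;> omega


-- stability and the bridge between the sorted and the raw dicts -------------
theorem pv_contrib_zero (die : Int) (ss : List (List (Int × Int))) (u i : Nat)
    (h : pvB_get (ss.getD i []) (u : Int) = 0) : pvContrib die ss u i = 0 := by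
  rw [pvContrib, h]
  exact pv_foldl_mul_zero (List.range ss.length) (fun j => i ≠ j)
    (fun j => pvAliveAt die (ss.getD j []) (if j < i then u else u - 1))

theorem pv_winsum_stable (die : Int) (ss : List (List (Int × Int))) (K τ : Nat) (i : Nat)
    (hK : ∀ kv ∈ ss.getD i [], kv.1 ≤ (K : Int)) (hle : K ≤ τ) :
    pvWinsum die ss τ i = pvWinsum die ss K i := by
  obtain ⟨d, rfl⟩ : ∃ d, τ = K + d := ⟨τ - K, by omega⟩
  induction d with
  | zero => rfl
  | succ d ih =>
    rw [show K + (d + 1) = (K + d) + 1 by omega, pv_winsum_succ,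
      ih (by omega), pv_contrib_zero, add_zero]
    apply pv_get_eq_zero
    intro kv hkv
    have := hK kv hkv
    push_cast
    omega

theorem pv_contrib_congr (die : Int) (ss ms : List (List (Int × Int)))
    (hlen : ss.length = ms.length)
    (hg : ∀ j, pvB_get (ss.getD j []) = pvB_get (ms.getD j []))
    (hm : ∀ j, pvB_maxKey (ss.getD j []) = pvB_maxKey (ms.getD j []))
    (u i : Nat) : pvContrib die ss u i = pvContrib die ms u i := by
  have halive : ∀ j x, pvAliveAt die (ss.getD j []) x = pvAliveAt die (ms.getD j []) x := by
    intro j x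
    rw [pvAliveAt, pvAliveAt, hm j,
      pv_alive_congr die (ss.getD j []) (ms.getD j []) (fun t => by rw [hg j])]
  rw [pvContrib, pvContrib, hlen, hg i]
  apply PySem.List.foldl_congr_mem
  intro acc x _
  rw [halive]

-- B-side lemmas -------------------------------------------------------------
theorem pv_pyRange_map (T : Nat) :
    PySem.List.pyRange 1 ((T : Int) + 1) = (List.range T).map (fun k : Nat => (k : Int) + 1) := by
  induction T with
  | zero => decide
  | succ T ih =>
    have h1 : ((T + 1 : Nat) : Int) + 1 = ((T : Int) + 1) + 1 := by push_cast; ring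
    rw [h1, PySem.List.pyRange_one_succ_right (by omega), ih, List.range_succ, List.map_append]
    push_cast
    rfl

theorem pv_traj_eq (die : Int) (d : List (Int × Int)) (L : Nat) :
    pvB_traj (die ^ 3) d (L : Int) = (List.range (L + 1)).map (pvAlive die d) := by
  rw [pvB_traj, pv_pyRange_map]
  induction L with
  | zero => rfl
  | succ L ih =>
    rw [List.range_succ (n := L), List.map_append, List.foldl_append, ih,
        List.range_succ (n := L + 1), List.map_append (l₁ := List.range (L + 1))]
    simp only [List.map_cons, List.map_nil, List.foldl_cons, List.foldl_nil]
    congr 1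
    have hlast : ((List.range (L + 1)).map (pvAlive die d)).getLast?.getD 0 = pvAlive die d L := by
      rw [List.range_succ, List.map_append]
      simp only [List.map_cons, List.map_nil, List.getLast?_concat]
      rfl
    rw [hlast]
    rfl

set_option maxHeartbeats 1000000 in
theorem pv_step (die : Int) (ss : List (List (Int × Int)))
    (hG : ∀ s ∈ ss, pvGood s ∧ pvDesc s) (t i : Nat) (hi : i < ss.length) :
    pvA_innerLoop die (t : Int) (pvState die ss t i) i = pvState die ss t (i + 1) := by
  have hsimem : ss.getD i [] ∈ ss := by
    rw [List.getD_eq_getElem ss [] hi]; exact List.getElem_mem hi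
  obtain ⟨⟨hne, hk1, hnd⟩, hdesc⟩ := hG _ hsimem
  have hmax1 : 1 ≤ pvB_maxKey (ss.getD i []) := by
    rcases List.mem_map.mp (pv_maxKey_mem _ hne) with ⟨kv, hkv, hk⟩
    have := hk1 kv hkv; omega
  have hkey_le : ∀ kv ∈ ss.getD i [], kv.1 ≤ pvB_maxKey (ss.getD i []) :=
    fun kv hkv => pv_maxKey_le _ kv.1 (List.mem_map_of_mem hkv)
  rw [pvA_innerLoop, pvState]
  simp only [pv_mapRange_getD _ _ _ i hi, Nat.lt_irrefl, if_false]
  by_cases hE : (ss.getD i []).filter (fun kv => decide ((t : Int) < kv.1)) = []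
  · -- player i already eliminated: nothing changes this turn
    have hMle : pvB_maxKey (ss.getD i []) ≤ (t : Int) := (pv_filter_nil_iff _ hne _).mp hE
    have hget0 : pvB_get (ss.getD i []) ((t  + 1 : Nat) : Int) = 0 := by
      apply pv_get_eq_zero
      intro kv hkv
      have := hkey_le kv hkv
      push_cast
      omega
    rw [if_pos (by rw [hE]; rfl), pvState]
    simp only [Prod.mk.injEq]
    refine ⟨?_, ?_, ?_, ?_⟩
    · apply List.map_congr_left
      intro j hj
      by_cases hji : j = i
      · subst hji
        simp only [Nat.lt_irrefl, Nat.lt_succ_self, if_true, if_false]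
        rw [hE]
        symm
        rw [pv_filter_nil_iff _ hne]
        omega
      · have h : (j < i) = (j < i + 1) := by simp only [eq_iff_iff]; omega
        simp only [h]
    · apply List.map_congr_left
      intro j hj
      by_cases hji : j = i
      · subst hji
        simp only [Nat.lt_irrefl, Nat.lt_succ_self, if_true, if_false]
        rw [pvAliveAt, pvAliveAt]
        congr 1
        omega
      · have h : (j < i) = (j < i + 1) := by simp only [eq_iff_iff]; omega
        simp only [h]
    · apply List.map_congr_left
      intro j hj
      by_cases hji : j = i
      · subst hji
        simp only [Nat.lt_irrefl, Nat.lt_succ_self, if_true, if_false]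
        rw [pv_winsum_succ, pv_contrib_zero die ss (t + 1) j hget0, add_zero]
      · have h : (j < i) = (j < i + 1) := by simp only [eq_iff_iff]; omega
        simp only [h]
    · have h : List.filter (fun j => decide ((if j < i then (t : Int) + 1 else (t : Int)) < pvB_maxKey (ss.getD j []))) (List.range ss.length)
          = List.filter (fun j => decide ((if j < i + 1 then (t : Int) + 1 else (t : Int)) < pvB_maxKey (ss.getD j []))) (List.range ss.length) := by
        apply List.filter_congr
        intro j hj
        by_cases hji : j = i
        · subst hji
          simp only [Nat.lt_irrefl, Nat.lt_succ_self, if_true, if_false]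
          rw [decide_eq_decide]
          omega
        · have h : (j < i) = (j < i + 1) := by simp only [eq_iff_iff]; omega
          simp only [h]
      rw [h]
  · -- player i still has moves
    have hlen : ¬ ((ss.getD i []).filter (fun kv => decide ((t : Int) < kv.1))).length = 0 := by
      simpa [List.length_eq_zero_iff] using hE
    rw [if_neg hlen]
    split
    case h_2 hL => exact absurd (List.getLast?_eq_none_iff.mp hL) hE
    case h_1 kv hL =>
      obtain ⟨hkvmem, hkvgt, hkvmin⟩ := pv_filter_getLast _ hdesc _ kv hL
      have hkvle := hkey_le kv hkvmem
      by_cases hkey : kv.1 = (t : Int) + 1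
      · -- player i wins universes this turn
        have hKge : (t : Int) + 1 ≤ pvB_maxKey (ss.getD i []) := by omega
        have hget : pvB_get (ss.getD i []) ((t + 1 : Nat) : Int) = kv.2 := by
          have h := pv_get_of_mem _ hnd kv hkvmem
          rw [hkey] at h
          rw [show ((t + 1 : Nat) : Int) = (t : Int) + 1 by push_cast; ring]
          exact h
        have hAsucc : pvAliveAt die (ss.getD i []) (t + 1)
            = pvAliveAt die (ss.getD i []) t * die ^ 3 - kv.2 := by
          rw [pvAliveAt, pvAliveAt,
            show min (t + 1) (pvB_maxKey (ss.getD i [])).toNat = t + 1 by omega,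
            show min t (pvB_maxKey (ss.getD i [])).toNat = t by omega]
          show pvAlive die _ t * die ^ 3 - pvB_get _ ((t : Int) + 1) = _
          rw [show ((t : Int) + 1) = ((t + 1 : Nat) : Int) by push_cast; ring, hget]
        rw [if_pos hkey, pvState]
        rw [pv_mapRange_set ss.length
          (fun j => pvAliveAt die (ss.getD j []) (if j < i then t + 1 else t)) i hi
          (pvAliveAt die (ss.getD i []) t * die ^ 3)]
        rw [pv_mapRange_getD ss.length
          (fun j => if j = i then pvAliveAt die (ss.getD i []) t * die ^ 3
            else pvAliveAt die (ss.getD j []) (if j < i then t + 1 else t)) 0 i hi]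
        simp only [eq_self_iff_true, if_true]
        rw [pv_mapRange_set ss.length
          (fun j => if j = i then pvAliveAt die (ss.getD i []) t * die ^ 3
            else pvAliveAt die (ss.getD j []) (if j < i then t + 1 else t)) i hi
          (pvAliveAt die (ss.getD i []) t * die ^ 3 - kv.2)]
        have hpu2 : (List.range ss.length).map
            (fun j => if j = i then pvAliveAt die (ss.getD i []) t * die ^ 3 - kv.2
              else if j = i then pvAliveAt die (ss.getD i []) t * die ^ 3
              else pvAliveAt die (ss.getD j []) (if j < i then t + 1 else t))
            = (List.range ss.length).map
            (fun j => pvAliveAt die (ss.getD j []) (if j < i + 1 then t + 1 else t)) := by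
          apply List.map_congr_left
          intro j hj
          by_cases hji : j = i
          · subst hji
            simp only [if_pos rfl, Nat.lt_succ_self, if_true]
            rw [hAsucc]
          · have h : (j < i) = (j < i + 1) := by simp only [eq_iff_iff]; omega
            simp only [if_neg hji, h]
        rw [hpu2]
        have hwu : ((List.range ss.length).map
              (fun j => pvAliveAt die (ss.getD j []) (if j < i + 1 then t + 1 else t))).zipIdx.foldl
              (fun w p => if i ≠ p.2 then w * p.1 else w) kv.2
            = pvContrib die ss (t + 1) i := by
          rw [pv_zipIdx_foldl
            ((List.range ss.length).map
              (fun j => pvAliveAt die (ss.getD j []) (if j < i + 1 then t + 1 else t)))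
            (0 : Int) (fun w a j => if i ≠ j then w * a else w) kv.2]
          rw [pvContrib]
          simp only [List.length_map, List.length_range]
          rw [show pvB_get (ss.getD i []) ((t + 1 : Nat) : Int) = kv.2 from hget]
          apply PySem.List.foldl_congr_mem
          intro acc j hj
          have hjn : j < ss.length := List.mem_range.mp hj
          by_cases hji : j = i
          · simp [hji]
          · have h1 : i ≠ j := fun h => hji h.symm
            simp only [if_pos h1, pv_mapRange_getD _ _ _ j hjn]
            congr 2
            by_cases hjlt : j < i
            · simp [hjlt, Nat.lt_succ_of_lt hjlt]
            · have h2 : ¬ j < i + 1 := by omega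
              simp [hjlt, h2]
        rw [hwu]
        have hdl := pv_filter_dropLast _ hdesc _ kv hL hkey
        simp only [Prod.mk.injEq]
        refine ⟨?_, trivial, ?_, ?_⟩
        · rw [pv_mapRange_set _ _ _ hi]
          apply List.map_congr_left
          intro j hj
          by_cases hji : j = i
          · subst hji
            simp only [if_pos rfl, Nat.lt_succ_self, if_true]
            exact hdl
          · have h : (j < i) = (j < i + 1) := by simp only [eq_iff_iff]; omega
            simp only [if_neg hji, h]
        · rw [pv_mapRange_set _ _ _ hi]
          apply List.map_congr_left
          intro j hj
          by_cases hji : j = i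
          · subst hji
            simp only [if_pos rfl, Nat.lt_irrefl, Nat.lt_succ_self, if_true, if_false,
              pv_mapRange_getD _ _ _ i hi]
            rw [pv_winsum_succ]
          · have h : (j < i) = (j < i + 1) := by simp only [eq_iff_iff]; omega
            simp only [if_neg hji, h]
        · have hcount := pv_count_update ss.length i
            (fun j => decide ((if j < i then (t : Int) + 1 else (t : Int)) < pvB_maxKey (ss.getD j [])))
            (fun j => decide ((if j < i + 1 then (t : Int) + 1 else (t : Int)) < pvB_maxKey (ss.getD j [])))
            (fun j hji => by
              have h : (j < i) = (j < i + 1) := by simp only [eq_iff_iff]; omega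
              simp only [h]) hi
          simp only [Nat.lt_irrefl, Nat.lt_succ_self, if_true, if_false] at hcount
          rw [hdl]
          by_cases hM : pvB_maxKey (ss.getD i []) = (t : Int) + 1
          · have hnil : (ss.getD i []).filter (fun kv => decide ((t : Int) + 1 < kv.1)) = [] := by
              rw [pv_filter_nil_iff _ hne]; omega
            rw [hnil]
            simp only [List.length_nil, if_pos rfl]
            rw [hcount, if_pos trivial,
              if_neg (show ¬ (decide ((t : Int) + 1 < pvB_maxKey (ss.getD i [])) = true) by
                simp only [decide_eq_true_eq]; omega),
              if_pos (show decide ((t : Int) < pvB_maxKey (ss.getD i [])) = true by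
                simp only [decide_eq_true_eq]; omega)]
            omega
          · have hnnil : (ss.getD i []).filter (fun kv => decide ((t : Int) + 1 < kv.1)) ≠ [] := by
              rw [Ne, pv_filter_nil_iff _ hne]; omega
            rw [if_neg (by simpa [List.length_eq_zero_iff] using hnnil)]
            rw [hcount,
              if_pos (show decide ((t : Int) + 1 < pvB_maxKey (ss.getD i [])) = true by
                simp only [decide_eq_true_eq]; omega),
              if_pos (show decide ((t : Int) < pvB_maxKey (ss.getD i [])) = true by
                simp only [decide_eq_true_eq]; omega)]
            omega
      · -- no win for player i this turn
        have hnokey : ∀ kv' ∈ ss.getD i [], kv'.1 ≠ (t : Int) + 1 := by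
          intro kv' hkv' hbad
          have := hkvmin kv' hkv' (by omega)
          omega
        have hKgt : (t : Int) < pvB_maxKey (ss.getD i []) := by omega
        have hget0 : pvB_get (ss.getD i []) ((t + 1 : Nat) : Int) = 0 := by
          apply pv_get_eq_zero
          intro kv' hkv'
          have := hnokey kv' hkv'
          push_cast
          omega
        rw [if_neg hkey, pvState]
        simp only [Prod.mk.injEq]
        refine ⟨?_, ?_, ?_, ?_⟩
        · apply List.map_congr_left
          intro j hj
          by_cases hji : j = i
          · subst hji
            simp only [Nat.lt_irrefl, Nat.lt_succ_self, if_true, if_false]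
            apply List.filter_congr
            intro kv' hkv'
            have h1 := hnokey kv' hkv'
            by_cases h2 : (t : Int) < kv'.1
            · have h3 : (t : Int) + 1 < kv'.1 := by omega
              simp [h2, h3]
            · have h3 : ¬ ((t : Int) + 1 < kv'.1) := by omega
              simp [h2, h3]
          · have h : (j < i) = (j < i + 1) := by simp only [eq_iff_iff]; omega
            simp only [h]
        · rw [pv_mapRange_set _ _ _ hi]
          apply List.map_congr_left
          intro j hj
          by_cases hji : j = i
          · subst hji
            simp only [if_pos rfl, Nat.lt_irrefl, Nat.lt_succ_self, if_true, if_false]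
            symm
            rw [pvAliveAt, pvAliveAt,
              show min (t + 1) (pvB_maxKey (ss.getD j [])).toNat = t + 1 by omega,
              show min t (pvB_maxKey (ss.getD j [])).toNat = t by omega]
            show pvAlive die _ t * die ^ 3 - pvB_get _ ((t : Int) + 1) = _
            rw [show ((t : Int) + 1) = ((t + 1 : Nat) : Int) by push_cast; ring, hget0, sub_zero]
          · have h : (j < i) = (j < i + 1) := by simp only [eq_iff_iff]; omega
            simp only [if_neg hji, h]
        · apply List.map_congr_left
          intro j hj
          by_cases hji : j = i
          · subst hji
            simp only [Nat.lt_irrefl, Nat.lt_succ_self, if_true, if_false]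
            rw [pv_winsum_succ, pv_contrib_zero die ss (t + 1) j hget0, add_zero]
          · have h : (j < i) = (j < i + 1) := by simp only [eq_iff_iff]; omega
            simp only [h]
        · have h : List.filter (fun j => decide ((if j < i then (t : Int) + 1 else (t : Int)) < pvB_maxKey (ss.getD j []))) (List.range ss.length)
              = List.filter (fun j => decide ((if j < i + 1 then (t : Int) + 1 else (t : Int)) < pvB_maxKey (ss.getD j []))) (List.range ss.length) := by
            apply List.filter_congr
            intro j hj
            by_cases hji : j = i
            · subst hji
              simp only [Nat.lt_irrefl, Nat.lt_succ_self, if_true, if_false]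
              have hMne : pvB_maxKey (ss.getD j []) ≠ (t : Int) + 1 := by
                rcases List.mem_map.mp (pv_maxKey_mem _ hne) with ⟨kv', hkv', hk'⟩
                rw [← hk']
                exact hnokey kv' hkv'
              rw [decide_eq_decide]
              omega
            · have h : (j < i) = (j < i + 1) := by simp only [eq_iff_iff]; omega
              simp only [h]
          rw [h]
theorem pv_turn (die : Int) (ss : List (List (Int × Int)))
    (hG : ∀ s ∈ ss, pvGood s ∧ pvDesc s) (t : Nat) :
    (List.range ss.length).foldl (pvA_innerLoop die (t : Int)) (pvState die ss t 0)
      = pvState die ss (t + 1) 0 := by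
  rw [pv_foldl_range_step ss.length (pvA_innerLoop die (t : Int)) (pvState die ss t)
    (fun i hi => pv_step die ss hG t i hi)]
  rw [pvState, pvState]
  have hc : ((t + 1 : Nat) : Int) = (t : Int) + 1 := by push_cast; ring
  simp only [Prod.mk.injEq]
  refine ⟨?_, ?_, ?_, ?_⟩
  · apply List.map_congr_left
    intro j hj
    have h1 : j < ss.length := List.mem_range.mp hj
    simp only [if_pos h1, if_neg (Nat.not_lt_zero j), hc]
  · apply List.map_congr_left
    intro j hj
    have h1 : j < ss.length := List.mem_range.mp hj
    simp only [if_pos h1, if_neg (Nat.not_lt_zero j)]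
  · apply List.map_congr_left
    intro j hj
    have h1 : j < ss.length := List.mem_range.mp hj
    simp only [if_pos h1, if_neg (Nat.not_lt_zero j)]
  · have h : List.filter (fun j => decide ((if j < ss.length then (t : Int) + 1 else (t : Int)) < pvB_maxKey (ss.getD j []))) (List.range ss.length)
        = List.filter (fun j => decide ((if j < 0 then ((t + 1 : Nat) : Int) + 1 else ((t + 1 : Nat) : Int)) < pvB_maxKey (ss.getD j []))) (List.range ss.length) := by
      apply List.filter_congr
      intro j hj
      have h1 : j < ss.length := List.mem_range.mp hj
      simp only [if_pos h1, if_neg (Nat.not_lt_zero j), hc]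
    rw [h]

theorem pv_while (die : Int) (ss : List (List (Int × Int)))
    (hG : ∀ s ∈ ss, pvGood s ∧ pvDesc s) (fuel t : Nat) :
    pvA_while die fuel (t : Int) (pvState die ss t 0)
      = (List.range ss.length).map (fun j => pvWinsum die ss (t + fuel) j) := by
  induction fuel generalizing t with
  | zero =>
    rw [pvA_while]
    simp [pvState]
  | succ fuel ih =>
    rw [pvA_while]
    by_cases hr : (pvState die ss t 0).2.2.2 ≠ 0
    · rw [if_pos hr]
      have hlen : (pvState die ss t 0).1.length = ss.length := by
        simp [pvState]
      rw [show (pvState die ss t 0).1 = (pvState die ss t 0).1 from rfl]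
      rw [hlen]
      have hfold : (List.range ss.length).foldl (pvA_innerLoop die (t : Int)) (pvState die ss t 0)
          = pvState die ss (t + 1) 0 := pv_turn die ss hG t
      rw [show ((t : Int) + 1) = ((t + 1 : Nat) : Int) by push_cast; ring, hfold, ih (t + 1)]
      apply List.map_congr_left
      intro j _
      rw [show t + 1 + fuel = t + (fuel + 1) by omega]
    · rw [if_neg hr]
      push_neg at hr
      have hall : ∀ j, j < ss.length → pvB_maxKey (ss.getD j []) ≤ (t : Int) := by
        intro j hjn
        by_contra hcon
        have hfe : List.filter (fun j => decide ((if j < 0 then (t : Int) + 1 else (t : Int)) < pvB_maxKey (ss.getD j []))) (List.range ss.length) = [] := by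
          have hr0 : (pvState die ss t 0).2.2.2 = 0 := hr
          simp only [pvState] at hr0
          apply List.length_eq_zero_iff.mp
          exact_mod_cast hr0
        rw [List.filter_eq_nil_iff] at hfe
        have := hfe j (List.mem_range.mpr hjn)
        simp only [if_neg (Nat.not_lt_zero j), decide_eq_true_eq] at this
        omega
      show (List.range ss.length).map (fun j => pvWinsum die ss t j) = _
      apply List.map_congr_left
      intro j hj
      have hjn : j < ss.length := List.mem_range.mp hj
      symm
      apply pv_winsum_stable die ss t (t + (fuel + 1)) j
      · intro kv hkv
        have h1 := pv_maxKey_le (ss.getD j []) kv.1 (List.mem_map_of_mem hkv)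
        have h2 := hall j hjn
        omega
      · omega

theorem pv_self_eq_mapRange {α : Type} (l : List α) (d : α) :
    (List.range l.length).map (fun j => l.getD j d) = l := by
  apply List.ext_getElem (by simp)
  intro i h1 h2
  rw [List.getElem_map, List.getElem_range, List.getD_eq_getElem l d h2]

theorem pv_nestedmax (ls : List (List (Int × Int))) : ∀ (a : Nat),
    (a ≤ ls.foldl (fun a m => m.foldl (fun a kv => max a kv.1.toNat) a) a) ∧
    ∀ m ∈ ls, ∀ kv ∈ m, kv.1.toNat ≤ ls.foldl (fun a m => m.foldl (fun a kv => max a kv.1.toNat) a) a := by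
  induction ls with
  | nil => simp
  | cons m ls ih =>
    intro a
    rw [List.foldl_cons]
    constructor
    · calc a ≤ m.foldl (fun a kv => max a kv.1.toNat) a :=
          (PySem.List.le_foldl_max_nat m (fun kv => kv.1.toNat) a).1
        _ ≤ _ := (ih _).1
    · intro m' hm' kv hkv
      rcases List.mem_cons.mp hm' with rfl | hm'
      · calc kv.1.toNat ≤ m'.foldl (fun a kv => max a kv.1.toNat) a :=
            (PySem.List.le_foldl_max_nat m' (fun kv => kv.1.toNat) a).2 kv hkv
          _ ≤ _ := (ih _).1
      · exact (ih _).2 m' hm' kv hkv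

theorem pv_winsum_congr (die : Int) (ss ms : List (List (Int × Int)))
    (hlen : ss.length = ms.length)
    (hg : ∀ j, pvB_get (ss.getD j []) = pvB_get (ms.getD j []))
    (hm : ∀ j, pvB_maxKey (ss.getD j []) = pvB_maxKey (ms.getD j []))
    (τ i : Nat) : pvWinsum die ss τ i = pvWinsum die ms τ i := by
  rw [pvWinsum, pvWinsum]
  congr 1
  apply List.map_congr_left
  intro u _
  exact pv_contrib_congr die ss ms hlen hg hm (u + 1) i

theorem pv_aliveAt_zero (die : Int) (s : List (Int × Int)) : pvAliveAt die s 0 = 1 := by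
  rw [pvAliveAt, Nat.zero_min]
  rfl

theorem pv_univ_eq (die : Int) (ms : List (List (Int × Int)))
    (hGm : ∀ m ∈ ms, pvGood m) (j : Nat) (hj : j < ms.length) (x : Nat) :
    pvB_univ ((ms.zip (ms.map pvB_maxKey)).map (fun dl => pvB_traj (die ^ 3) dl.1 dl.2))
      (ms.map pvB_maxKey) j (x : Int) = pvAliveAt die (ms.getD j []) x := by
  have hmem : ms.getD j [] ∈ ms := by
    rw [List.getD_eq_getElem ms [] hj]; exact List.getElem_mem hj
  obtain ⟨hne, hk1, hnd⟩ := hGm _ hmem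
  have hmax1 : 1 ≤ pvB_maxKey (ms.getD j []) := by
    rcases List.mem_map.mp (pv_maxKey_mem _ hne) with ⟨kv, hkv, hk⟩
    have := hk1 kv hkv; omega
  have hmt : (ms.map pvB_maxKey).getD j 0 = pvB_maxKey (ms.getD j []) := by
    rw [List.getD_eq_getElem _ 0 (by simpa using hj), List.getElem_map,
      List.getD_eq_getElem ms [] hj]
  have halive : ((ms.zip (ms.map pvB_maxKey)).map (fun dl => pvB_traj (die ^ 3) dl.1 dl.2)).getD j []
      = pvB_traj (die ^ 3) (ms.getD j []) (pvB_maxKey (ms.getD j [])) := by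
    rw [List.getD_eq_getElem _ [] (by simpa using hj), List.getElem_map, List.getElem_zip,
      List.getElem_map]
    rw [List.getD_eq_getElem ms [] hj]
  set K := (pvB_maxKey (ms.getD j [])).toNat with hK
  have hKc : ((K : Nat) : Int) = pvB_maxKey (ms.getD j []) := Int.toNat_of_nonneg (by omega)
  rw [pvB_univ, hmt, halive, ← hKc, pv_traj_eq, pvAliveAt]
  have h1 : (min (x : Int) ((K : Nat) : Int)).toNat = min x K := by omega
  rw [h1, pv_mapRange_getD (K + 1) _ 0 (min x K) (by omega)]

set_option maxHeartbeats 1000000 in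
theorem pv_B_eval (die : Int) (ms : List (List (Int × Int))) (n : Nat) (hn : ms.length = n)
    (hGm : ∀ m ∈ ms, pvGood m) (TBn : Nat) :
    (List.range TBn).foldl (fun wins (τ : Nat) =>
        (List.range n).foldl (fun wins i =>
            if pvB_get (ms.getD i []) ((τ : Int) + 1) = 0 then wins
            else
              wins.set i (wins.getD i 0 +
                (List.range n).foldl (fun w j =>
                    if j < i then
                      w * pvB_univ ((ms.zip (ms.map pvB_maxKey)).map
                          (fun dl => pvB_traj (die ^ 3) dl.1 dl.2)) (ms.map pvB_maxKey) j ((τ : Int) + 1)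
                    else if i < j then
                      w * pvB_univ ((ms.zip (ms.map pvB_maxKey)).map
                          (fun dl => pvB_traj (die ^ 3) dl.1 dl.2)) (ms.map pvB_maxKey) j ((τ : Int) + 1 - 1)
                    else w)
                  (pvB_get (ms.getD i []) ((τ : Int) + 1))))
          wins)
      ((List.range n).map (fun i => pvWinsum die ms 0 i))
    = (List.range n).map (fun i => pvWinsum die ms TBn i) := by
  have huniv : ∀ (j : Nat), j < n → ∀ (x : Nat),
      pvB_univ ((ms.zip (ms.map pvB_maxKey)).map (fun dl => pvB_traj (die ^ 3) dl.1 dl.2))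
        (ms.map pvB_maxKey) j (x : Int) = pvAliveAt die (ms.getD j []) x := by
    intro j hj x
    exact pv_univ_eq die ms hGm j (by omega) x
  apply pv_foldl_range_step TBn _ (fun τ => (List.range n).map (fun i => pvWinsum die ms τ i))
  intro τ hτ
  have hcast : ((τ + 1 : Nat) : Int) = (τ : Int) + 1 := by push_cast; ring
  have hΨ0 : (List.range n).map (fun i => pvWinsum die ms τ i)
      = (List.range n).map (fun j => pvWinsum die ms τ j +
          if j < 0 then pvContrib die ms (τ + 1) j else 0) := by
    apply List.map_congr_left
    intro j _
    rw [if_neg (Nat.not_lt_zero j), add_zero]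
  rw [hΨ0]
  rw [pv_foldl_range_step n _ (fun i => (List.range n).map (fun j => pvWinsum die ms τ j +
      if j < i then pvContrib die ms (τ + 1) j else 0)) ?_]
  · apply List.map_congr_left
    intro j hj
    have hjn : j < n := List.mem_range.mp hj
    rw [if_pos hjn, ← pv_winsum_succ]
  · intro i hi
    by_cases hw : pvB_get (ms.getD i []) ((τ : Int) + 1) = 0
    · rw [if_pos hw]
      apply List.map_congr_left
      intro j hj
      by_cases hji : j = i
      · subst hji
        rw [if_neg (Nat.lt_irrefl j), if_pos (Nat.lt_succ_self j),
          pv_contrib_zero die ms (τ + 1) j (by rw [hcast]; exact hw)]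
      · have h : (j < i) = (j < i + 1) := by simp only [eq_iff_iff]; omega
        simp only [h]
    · rw [if_neg hw]
      rw [pv_mapRange_getD _ _ _ i hi]
      simp only [Nat.lt_irrefl, if_false, add_zero]
      have hfold : (List.range n).foldl (fun w j =>
            if j < i then
              w * pvB_univ ((ms.zip (ms.map pvB_maxKey)).map
                  (fun dl => pvB_traj (die ^ 3) dl.1 dl.2)) (ms.map pvB_maxKey) j ((τ : Int) + 1)
            else if i < j then
              w * pvB_univ ((ms.zip (ms.map pvB_maxKey)).map
                  (fun dl => pvB_traj (die ^ 3) dl.1 dl.2)) (ms.map pvB_maxKey) j ((τ : Int) + 1 - 1)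
            else w)
          (pvB_get (ms.getD i []) ((τ : Int) + 1)) = pvContrib die ms (τ + 1) i := by
        rw [pvContrib, hn, hcast]
        apply PySem.List.foldl_congr_mem
        intro acc j hj
        have hjn : j < n := List.mem_range.mp hj
        by_cases h1 : j < i
        · rw [if_pos h1, if_pos (show i ≠ j by omega), if_pos h1,
            show ((τ : Int) + 1) = ((τ + 1 : Nat) : Int) from hcast.symm, huniv j hjn (τ + 1)]
        · by_cases h2 : i < j
          · rw [if_neg h1, if_pos h2, if_pos (show i ≠ j by omega), if_neg h1,
              show ((τ : Int) + 1 - 1) = ((τ : Int)) by ring,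
              show (τ + 1 - 1 : Nat) = τ by omega, huniv j hjn τ]
          · have hji : j = i := by omega
            rw [if_neg h1, if_neg h2, if_neg (show ¬ i ≠ j by omega)]
      rw [hfold, pv_mapRange_set _ _ _ hi]
      apply List.map_congr_left
      intro j hj
      by_cases hji : j = i
      · subst hji
        rw [if_pos rfl, if_pos (Nat.lt_succ_self j)]
      · have h : (j < i) = (j < i + 1) := by simp only [eq_iff_iff]; omega
        simp only [if_neg hji, h]
set_option maxHeartbeats 2000000 in
-- ===== VERDICT (by name: the statement is the Claim_ definition above) =====
theorem compute_winning_universe_counts_spec : Claim_equal_compute_winning_universe_counts := by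
  intro positions ptm die _ hPre
  rw [Spec_compute_winning_universe_counts]
  simp only [compute_winning_universe_counts, compute_winning_universe_counts_alt]
  set ms := positions.map (fun p => (PySem.List.pyGet? ptm (p - 1)).getD []) with hms
  set ss := positions.map (fun p =>
    PySem.List.sorted2 ((PySem.List.pyGet? ptm (p - 1)).getD []) Prod.fst Prod.snd true) with hss
  have hlen_ms : ms.length = positions.length := by rw [hms, List.length_map]
  have hlen_ss : ss.length = positions.length := by rw [hss, List.length_map]
  have hoor : ∀ (l : List (List (Int × Int))) (j : Nat), l.length ≤ j → l.getD j [] = [] := by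
    intro l j hj
    rw [List.getD_eq_getElem?_getD, List.getElem?_eq_none hj]
    rfl
  have hGm : ∀ m ∈ ms, pvGood m := by
    intro m hm
    rw [hms] at hm
    rcases List.mem_map.mp hm with ⟨p, hp, rfl⟩
    rcases hPre p hp with ⟨_, h1, h2, h3⟩
    exact ⟨h1, h2, h3⟩
  have hGm' : ∀ j, j < positions.length → pvGood (ms.getD j []) := by
    intro j hj
    apply hGm
    rw [List.getD_eq_getElem ms [] (by omega)]
    exact List.getElem_mem _
  have hsm : ∀ j, j < positions.length →
      ss.getD j [] = PySem.List.sorted2 (ms.getD j []) Prod.fst Prod.snd true := by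
    intro j hj
    rw [hss, hms]
    rw [List.getD_eq_getElem _ [] (by simpa using hj), List.getElem_map,
      List.getD_eq_getElem _ [] (by simpa using hj), List.getElem_map]
  have hperm : ∀ j, j < positions.length → (ss.getD j []).Perm (ms.getD j []) := by
    intro j hj
    rw [hsm j hj]
    exact PySem.List.sorted2_perm _ _ _ _
  have hGood_ss : ∀ s ∈ ss, pvGood s ∧ pvDesc s := by
    intro s hsmem
    rcases List.mem_iff_getElem.mp hsmem with ⟨j, hj, rfl⟩
    have hj' : j < positions.length := by omega
    have hjd : ss[j] = ss.getD j [] := (List.getD_eq_getElem ss [] hj).symm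
    rw [hjd]
    obtain ⟨hne, hk1, hnd⟩ := hGm' j hj'
    refine ⟨⟨?_, ?_, ?_⟩, ?_⟩
    · intro h0
      have hp2 := hperm j hj'
      rw [h0] at hp2
      exact hne hp2.symm.eq_nil
    · intro kv hkv
      exact hk1 kv ((hperm j hj').mem_iff.mp hkv)
    · exact (((hperm j hj').map Prod.fst).nodup_iff).mpr hnd
    · rw [hsm j hj']
      exact pv_sorted2_desc _ hnd
  have hg : ∀ j, pvB_get (ss.getD j []) = pvB_get (ms.getD j []) := by
    intro j
    by_cases hj : j < positions.length
    · funext x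
      exact pv_get_perm _ _ (hperm j hj) (hGm' j hj).2.2 x
    · rw [hoor ss j (by omega), hoor ms j (by omega)]
  have hmx : ∀ j, pvB_maxKey (ss.getD j []) = pvB_maxKey (ms.getD j []) := by
    intro j
    by_cases hj : j < positions.length
    · exact pv_maxKey_perm _ _ (hperm j hj) (hGm' j hj).1
    · rw [hoor ss j (by omega), hoor ms j (by omega)]
  -- ===== A side =====
  have hinit : ((ss, List.replicate positions.length (1 : Int),
      List.replicate positions.length (0 : Int), (positions.length : Int)) :
      List (List (Int × Int)) × List Int × List Int × Int) = pvState die ss 0 0 := by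
    rw [pvState]
    simp only [Prod.mk.injEq]
    have hifI : ∀ (j : Nat) (a b : Int), (if j < 0 then a else b) = b :=
      fun j a b => if_neg (Nat.not_lt_zero j)
    have hifN : ∀ (j : Nat) (a b : Nat), (if j < 0 then a else b) = b :=
      fun j a b => if_neg (Nat.not_lt_zero j)
    refine ⟨?_, ?_, ?_, ?_⟩
    · symm
      have h1 : ∀ j ∈ List.range ss.length,
          (ss.getD j []).filter (fun kv => decide ((if j < 0 then ((0 : Nat) : Int) + 1 else ((0 : Nat) : Int)) < kv.1))
            = ss.getD j [] := by
        intro j hj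
        have hjn : j < positions.length := by
          have := List.mem_range.mp hj; omega
        rw [List.filter_eq_self]
        intro kv hkv
        have h2 := (hGood_ss (ss.getD j []) (by
          rw [List.getD_eq_getElem ss [] (by omega)]; exact List.getElem_mem _)).1.2.1 kv hkv
        rw [hifI]
        simp only [decide_eq_true_eq]
        omega
      rw [List.map_congr_left h1]
      exact pv_self_eq_mapRange ss []
    · symm
      apply List.eq_replicate_iff.mpr
      refine ⟨by simp [hlen_ss], ?_⟩
      intro b hb
      rcases List.mem_map.mp hb with ⟨j, _, rfl⟩
      rw [hifN, pv_aliveAt_zero]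
    · symm
      apply List.eq_replicate_iff.mpr
      refine ⟨by simp [hlen_ss], ?_⟩
      intro b hb
      rcases List.mem_map.mp hb with ⟨j, _, rfl⟩
      rw [hifN]
      rfl
    · have h1 : List.filter (fun j => decide ((if j < 0 then ((0 : Nat) : Int) + 1 else ((0 : Nat) : Int)) < pvB_maxKey (ss.getD j []))) (List.range ss.length)
          = List.range ss.length := by
        rw [List.filter_eq_self]
        intro j hj
        have hjn : j < positions.length := by
          have := List.mem_range.mp hj; omega
        have hgood := (hGood_ss (ss.getD j []) (by
          rw [List.getD_eq_getElem ss [] (by omega)]; exact List.getElem_mem _)).1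
        have hmax1 : 1 ≤ pvB_maxKey (ss.getD j []) := by
          rcases List.mem_map.mp (pv_maxKey_mem _ hgood.1) with ⟨kv, hkv, hk⟩
          have := hgood.2.1 kv hkv; omega
        rw [hifI, decide_eq_true_eq]
        omega
      rw [h1, List.length_range, hlen_ss]
  have hw := pv_while die ss hGood_ss
    (ss.foldl (fun a m => m.foldl (fun a kv => max a kv.1.toNat) a) 0) 0
  rw [Nat.cast_zero, Nat.zero_add] at hw
  rw [hinit, hw]
  -- ===== B side =====
  have htot : 0 ≤ (match ms.map pvB_maxKey with | [] => (0 : Int) | k :: ks => ks.foldl max k) := by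
    cases hc : ms.map pvB_maxKey with
    | nil => simp
    | cons k ks =>
      simp only
      have hk : 1 ≤ k := by
        have hmem : k ∈ ms.map pvB_maxKey := by rw [hc]; simp
        rcases List.mem_map.mp hmem with ⟨m, hm, rfl⟩
        obtain ⟨hne, hk1, _⟩ := hGm m hm
        rcases List.mem_map.mp (pv_maxKey_mem m hne) with ⟨kv, hkv, hkk⟩
        have := hk1 kv hkv; omega
      have := (PySem.List.le_foldl_max ks k).1
      omega
  have hTc : (((match ms.map pvB_maxKey with | [] => (0 : Int) | k :: ks => ks.foldl max k).toNat : Nat) : Int)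
      = (match ms.map pvB_maxKey with | [] => (0 : Int) | k :: ks => ks.foldl max k) :=
    Int.toNat_of_nonneg htot
  set TBn := (match ms.map pvB_maxKey with | [] => (0 : Int) | k :: ks => ks.foldl max k).toNat with hTBn
  rw [← hTc, pv_pyRange_map TBn, List.foldl_map (f := fun k : Nat => (k : Int) + 1)]
  have hΦ0 : List.replicate positions.length (0 : Int)
      = (List.range positions.length).map (fun i => pvWinsum die ms 0 i) := by
    symm
    apply List.eq_replicate_iff.mpr
    refine ⟨by simp, ?_⟩
    intro b hb
    rcases List.mem_map.mp hb with ⟨j, _, rfl⟩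
    rfl
  rw [hΦ0]
  beta_reduce
  rw [pv_B_eval die ms positions.length hlen_ms hGm TBn]
  -- ===== the two sides agree =====
  rw [hlen_ss]
  apply List.map_congr_left
  intro j hj
  have hjn : j < positions.length := List.mem_range.mp hj
  have hsmem : ss.getD j [] ∈ ss := by
    rw [List.getD_eq_getElem ss [] (by omega)]; exact List.getElem_mem _
  have hkeys_f : ∀ kv ∈ ss.getD j [],
      kv.1 ≤ ((ss.foldl (fun a m => m.foldl (fun a kv => max a kv.1.toNat) a) 0 : Nat) : Int) := by
    intro kv hkv
    have h1 := (pv_nestedmax ss 0).2 _ hsmem kv hkv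
    omega
  have hkeys_T : ∀ kv ∈ ss.getD j [], kv.1 ≤ ((TBn : Nat) : Int) := by
    intro kv hkv
    have h1 := pv_maxKey_le _ kv.1 (List.mem_map_of_mem hkv)
    have h2 := hmx j
    have h3 : pvB_maxKey (ms.getD j []) ∈ ms.map pvB_maxKey := by
      rw [List.getD_eq_getElem ms [] (by omega)]
      exact List.mem_map_of_mem (List.getElem_mem _)
    have h4 : pvB_maxKey (ms.getD j [])
        ≤ (match ms.map pvB_maxKey with | [] => (0 : Int) | k :: ks => ks.foldl max k) := by
      cases hc : ms.map pvB_maxKey with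
      | nil => rw [hc] at h3; simp at h3
      | cons k ks =>
        rw [hc] at h3
        simp only
        rcases List.mem_cons.mp h3 with h5 | h5
        · rw [h5]; exact (PySem.List.le_foldl_max ks k).1
        · exact (PySem.List.le_foldl_max ks k).2 _ h5
    rw [hTc]
    omega
  set fuelA := ss.foldl (fun a m => m.foldl (fun a kv => max a kv.1.toNat) a) 0 with hfa
  calc pvWinsum die ss fuelA j
      = pvWinsum die ss (max fuelA TBn) j :=
        (pv_winsum_stable die ss fuelA (max fuelA TBn) j hkeys_f (le_max_left _ _)).symm
    _ = pvWinsum die ss TBn j :=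
        pv_winsum_stable die ss TBn (max fuelA TBn) j hkeys_T (le_max_right _ _)
    _ = pvWinsum die ms TBn j := pv_winsum_congr die ss ms (by omega) hg hmx TBn j
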